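-- pv_equiv track=rewrite | github.com/RacleRay/MyLeetCodeLife | DataStructure&Algorithms_Coursera/StringAlgo/TrieAndSuffix/trie_matching_extended/trie_matching_extended.py | solve
-- ===== SOURCE A (Python) =====
-- class Node:
-- 	def __init__ (self):
-- 		self.next = {}
-- 		self.patternEnd = False
--
-- def build_trie(patterns):
-- 	root = Node()
-- 	for pattern in patterns:
-- 		currentNode = root
-- 		for i in range(0, len(pattern)):
-- 			currentSymbol = pattern[i]
--
-- 			if currentSymbol in currentNode.next:
-- 				currentNode = currentNode.next[currentSymbol]
-- 				if i == len(pattern) - 1: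
-- 					currentNode.patternEnd = True
-- 			else:
-- 				newNode = Node()
-- 				currentNode.next[currentSymbol] = newNode
-- 				currentNode = newNode
-- 				if i == len(pattern) - 1:
-- 					currentNode.patternEnd = True
--
-- 	return root
--
-- def prefix_trie_match(text, trie_root):
-- 	index = 0
-- 	length = len(text)
-- 	symbol = text[index]
--
-- 	node = trie_root
-- 	res = ''
-- 	while True:
-- 		if node.patternEnd == True:  # arrive end node
-- 			return res
--
-- 		elif symbol in node.next:  # have an edge
-- 			res += symbol  # path record
-- 			# next node
-- 			node = node.next[symbol]
-- 			# next text
-- 			index += 1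
-- 			# 当不是end node时，text已经遍历结束，symbol = None
-- 			if index < length:
-- 				symbol = text[index]
-- 			else:
-- 				symbol = None
--
-- 		else:
-- 			return None
--
-- def solve (text, n, patterns):
-- 	result = []
-- 	root = build_trie(patterns)
--
-- 	cut_index = 0
-- 	text_ = text[cut_index: ]
-- 	while text_:
--
-- 		if prefix_trie_match(text[cut_index: ], root):
-- 			result.append(cut_index)
--
-- 		cut_index += 1
-- 		text_ = text[cut_index: ]
--
-- 	return result
-- ===== SOURCE B (Python) =====
-- def solve(text, n, patterns):
--     return [i for i in range(len(text))
--             if any(p and text.startswith(p, i) for p in patterns)]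
-- ===== Notes on version B (the rewrite author's own statement) =====
-- stated objective: simpler
-- what changed: Replaced the Node/trie construction and the char-by-char trie walk with a one-line scan: for each position i, keep i when some non-empty pattern is a prefix of text starting at i (any + startswith); no trie is built.
import Mathlib
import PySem

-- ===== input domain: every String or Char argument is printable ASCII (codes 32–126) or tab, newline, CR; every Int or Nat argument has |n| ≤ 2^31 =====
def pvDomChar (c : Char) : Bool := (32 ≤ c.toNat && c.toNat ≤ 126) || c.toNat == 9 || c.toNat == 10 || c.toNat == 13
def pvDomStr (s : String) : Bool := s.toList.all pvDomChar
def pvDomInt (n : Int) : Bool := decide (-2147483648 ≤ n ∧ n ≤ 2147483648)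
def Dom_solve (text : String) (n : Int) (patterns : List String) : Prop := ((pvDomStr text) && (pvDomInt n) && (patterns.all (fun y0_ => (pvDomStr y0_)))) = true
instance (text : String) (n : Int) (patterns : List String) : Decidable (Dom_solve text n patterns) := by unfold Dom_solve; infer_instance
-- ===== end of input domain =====

-- B drops A's trie machinery for a one-line any/startswith scan (objective: simpler, same observable result).

-- ===== PORT A =====
-- Python's Node objects (a dict of children + a patternEnd flag) become a mutual
-- inductive trie; dict mutation along the walk becomes path-copying update.
mutual
inductive Trie where
  | mk : Bool → TrieMap → Trie
  deriving Repr
inductive TrieMap where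
  | nil : TrieMap
  | cons : Char → Trie → TrieMap → TrieMap
  deriving Repr
end

def endOf : Trie → Bool
  | .mk b _ => b

def mapOf : Trie → TrieMap
  | .mk _ m => m

-- dict lookup: currentNode.next[c]
def lookupT : TrieMap → Char → Option Trie
  | .nil, _ => none
  | .cons d tr rest, c => if c = d then some tr else lookupT rest c

-- dict store: currentNode.next[c] = node (overwrite in place / append)
def setT : TrieMap → Char → Trie → TrieMap
  | .nil, c, v => .cons c v .nil
  | .cons d tr rest, c, v => if c = d then .cons d v rest else .cons d tr (setT rest c v)

-- the inner 'for i in range(len(pattern))' loop of build_trie, as recursion on the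
-- pattern's remaining chars; mutation of the visited node becomes rebuilding the path
def ins : Trie → List Char → Trie
  | tr, [] => tr
  | .mk b m, c :: rest =>
    let child := (lookupT m c).getD (Trie.mk false .nil)   -- existing edge or newNode
    let child' := if rest.isEmpty then Trie.mk true (mapOf child)  -- i == len-1: patternEnd = True
                  else ins child rest
    Trie.mk b (setT m c child')

-- build_trie: 'for pattern in patterns'
def buildTrie (patterns : List String) : Trie :=
  patterns.foldl (fun root p => ins root p.toList) (Trie.mk false .nil)

-- prefix_trie_match's while loop: each iteration either returns or consumes one symbol
def matchGo (tr : Trie) (t : List Char) (res : List Char) : Option (List Char) :=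
  if endOf tr then some res
  else
    match t with
    | [] => none                                    -- symbol = None and no edge
    | c :: rest =>
      match lookupT (mapOf tr) c with
      | some n => matchGo n rest (res ++ [c])
      | none => none

-- Python truthiness of the Optional[str] result
def truthyOf : Option (List Char) → Bool
  | none => false
  | some s => !s.isEmpty

-- solve's while loop over cut_index / text_
def solveLoop (root : Trie) (cut : Int) : List Char → List Int
  | [] => []
  | c :: rest =>
    (if truthyOf (matchGo root (c :: rest) []) then [cut] else []) ++
      solveLoop root (cut + 1) rest

def solve (text : String) (n : Int) (patterns : List String) : List Int :=
  solveLoop (buildTrie patterns) 0 text.toList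

-- ===== PORT B =====
def solve_alt (text : String) (n : Int) (patterns : List String) : List Int :=
  ((List.range text.toList.length).filter
      (fun i => patterns.any (fun p => !p.toList.isEmpty && p.toList.isPrefixOf (text.toList.drop i)))).map
    (fun (i : Nat) => (i : Int))

-- ===== PRECONDITION & SPEC =====
def Spec_solve (text : String) (n : Int) (patterns : List String) (out : List Int) : Prop := out = solve_alt text n patterns
instance (text : String) (n : Int) (patterns : List String) (out : List Int) : Decidable (Spec_solve text n patterns out) := by unfold Spec_solve; infer_instance

-- ===== CLAIM (what is proved, stated in full; the proofs are below) =====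
def Claim_equal_solve : Prop := ∀ (text : String) (n : Int) (patterns : List String), Dom_solve text n patterns → Spec_solve text n patterns (solve text n patterns)

-- ===== LEMMAS AND PROOFS =====
-- lemmas scratch
def ends (tr : Trie) : List Char → Bool
  | [] => endOf tr
  | c :: w =>
    match lookupT (mapOf tr) c with
    | some n => ends n w
    | none => false

def hasEP (tr : Trie) : List Char → Bool
  | [] => false
  | c :: rest =>
    match lookupT (mapOf tr) c with
    | some n => endOf n || hasEP n rest
    | none => false

theorem lookupT_setT : ∀ (m : TrieMap) (c d : Char) (v : Trie),
    lookupT (setT m c v) d = if d = c then some v else lookupT m d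
  | .nil, c, d, v => by simp [setT, lookupT]
  | .cons e tr rest, c, d, v => by
    by_cases h : c = e
    · subst h; by_cases hd : d = c <;> simp [setT, lookupT, hd]
    · by_cases hd : d = e
      · subst hd
        simp [setT, lookupT, h]
        intro h'; exact absurd h'.symm h
      · simp [setT, lookupT, h, hd, lookupT_setT rest c d v]

theorem ends_default (w : List Char) : ends (Trie.mk false .nil) w = false := by
  cases w <;> simp [ends, endOf, mapOf, lookupT]

theorem ends_ins (p : List Char) : ∀ (tr : Trie) (w : List Char),
    ends (ins tr p) w = (ends tr w || (decide (w = p) && !p.isEmpty)) := by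
  induction p with
  | nil => intro tr w; simp [ins]
  | cons c rest ih =>
    intro tr w
    obtain ⟨b, m⟩ := tr
    cases w with
    | nil => simp [ins, ends, endOf]
    | cons d w' =>
      by_cases hd : d = c
      · subst hd
        by_cases hr : rest = []
        · subst hr
          cases w' with
          | nil =>
            cases hlk : lookupT m d <;>
              simp [ins, ends, mapOf, lookupT_setT, endOf]
          | cons e w'' =>
            cases hlk : lookupT m d <;>
              simp [ins, ends, mapOf, lookupT_setT, endOf, hlk, lookupT, Option.getD]
        · have hrne : rest.isEmpty = false := by simp [hr]
          cases hlk : lookupT m d with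
          | some n =>
            simp [ins, ends, mapOf, lookupT_setT, hlk, hrne, ih, Option.getD, hr]
          | none =>
            simp [ins, ends, mapOf, lookupT_setT, hlk, hrne, Option.getD, ih,
                  ends_default, hr]
      · simp [ins, ends, mapOf, lookupT_setT, hd]
theorem ends_build (patterns : List String) (w : List Char) :
    ends (buildTrie patterns) w =
      (!w.isEmpty && patterns.any (fun p => p.toList = w)) := by
  have key : ∀ (ps : List String) (tr : Trie),
      ends (ps.foldl (fun root p => ins root p.toList) tr) w =
        (ends tr w || (!w.isEmpty && ps.any (fun p => p.toList = w))) := by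
    intro ps
    induction ps with
    | nil => intro tr; simp
    | cons p ps ih =>
      intro tr
      simp only [List.foldl_cons, ih, ends_ins, List.any_cons]
      by_cases h : w = p.toList
      · subst h
        cases hE : ends tr p.toList <;> cases hI : p.toList.isEmpty <;> simp [hE, hI]
      · have h' : ¬(p.toList = w) := fun e => h e.symm
        simp [h, h', Bool.or_assoc]
  rw [buildTrie, key, ends_default]
  simp

theorem hasEP_iff : ∀ (t : List Char) (tr : Trie),
    hasEP tr t = true ↔ ∃ w, w ≠ [] ∧ w <+: t ∧ ends tr w = true := by
  intro t
  induction t with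
  | nil =>
    intro tr
    simp only [hasEP]
    constructor
    · intro h; exact absurd h (by simp)
    · rintro ⟨w, hw, hpre, _⟩
      exact absurd (List.prefix_nil.mp hpre) hw
  | cons c rest ih =>
    intro tr
    cases hlk : lookupT (mapOf tr) c with
    | none =>
      simp only [hasEP, hlk]
      constructor
      · intro h; exact absurd h (by simp)
      · rintro ⟨w, hw, hpre, hend⟩
        cases w with
        | nil => exact absurd rfl hw
        | cons d w' =>
          have hd : d = c := (List.cons_prefix_cons.mp hpre).1
          subst hd
          simp [ends, hlk] at hend
    | some n =>
      simp only [hasEP, hlk, Bool.or_eq_true]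
      constructor
      · rintro (he | hrest)
        · exact ⟨[c], by simp, by simp, by simp [ends, hlk, he]⟩
        · obtain ⟨w, hw, hpre, hend⟩ := (ih n).mp hrest
          exact ⟨c :: w, by simp, List.cons_prefix_cons.mpr ⟨rfl, hpre⟩,
                 by simp [ends, hlk, hend]⟩
      · rintro ⟨w, hw, hpre, hend⟩
        cases w with
        | nil => exact absurd rfl hw
        | cons d w' =>
          have hd : d = c := (List.cons_prefix_cons.mp hpre).1
          subst hd
          simp only [ends, hlk] at hend
          cases w' with
          | nil => exact Or.inl hend
          | cons e w'' =>
            exact Or.inr ((ih n).mpr ⟨e :: w'', by simp,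
              (List.cons_prefix_cons.mp hpre).2, hend⟩)

theorem matchGo_truthy_ne : ∀ (t : List Char) (tr : Trie) (res : List Char),
    res ≠ [] → truthyOf (matchGo tr t res) = (endOf tr || hasEP tr t) := by
  intro t
  induction t with
  | nil =>
    intro tr res hres
    by_cases he : endOf tr = true <;> simp [matchGo, he, truthyOf, hasEP, hres]
  | cons c rest ih =>
    intro tr res hres
    by_cases he : endOf tr = true
    · simp [matchGo, he, truthyOf, hres]
    · have he' : endOf tr = false := by simpa using he
      cases hlk : lookupT (mapOf tr) c with
      | none => simp [matchGo, he', hlk, truthyOf, hasEP]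
      | some n =>
        simp only [matchGo, he', hlk, Bool.false_eq_true, if_false, hasEP,
                   Bool.false_or]
        exact ih n (res ++ [c]) (by simp)

theorem matchGo_truthy (tr : Trie) (t : List Char) (hroot : endOf tr = false) :
    truthyOf (matchGo tr t []) = hasEP tr t := by
  cases t with
  | nil => simp [matchGo, hroot, hasEP, truthyOf]
  | cons c rest =>
    cases hlk : lookupT (mapOf tr) c with
    | none => simp [matchGo, hroot, hlk, truthyOf, hasEP]
    | some n =>
      simp only [matchGo, hroot, hlk, Bool.false_eq_true, if_false, hasEP]
      exact matchGo_truthy_ne rest n ([] ++ [c]) (by simp)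
theorem cond_eq (patterns : List String) (t : List Char) :
    truthyOf (matchGo (buildTrie patterns) t []) =
      patterns.any (fun p => !p.toList.isEmpty && p.toList.isPrefixOf t) := by
  have hroot : endOf (buildTrie patterns) = false := by
    have := ends_build patterns []
    simpa [ends] using this
  rw [matchGo_truthy _ _ hroot]
  by_cases h : hasEP (buildTrie patterns) t = true
  · obtain ⟨w, hw, hpre, hend⟩ := (hasEP_iff t _).mp h
    rw [ends_build] at hend
    obtain ⟨p, hp, hpw⟩ := List.any_eq_true.mp (Bool.and_elim_right hend)
    rw [h, eq_comm, List.any_eq_true]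
    refine ⟨p, hp, ?_⟩
    have hpw' : p.toList = w := by simpa using hpw
    simp [hpw', hw, List.isPrefixOf_iff_prefix, hpre, List.isEmpty_iff]
  · rw [Bool.eq_false_iff.mpr h, eq_comm, Bool.eq_false_iff]
    intro hany
    obtain ⟨p, hp, hcond⟩ := List.any_eq_true.mp hany
    have h1 : p.toList ≠ [] := by
      simpa [List.isEmpty_iff] using (Bool.and_elim_left hcond)
    have h2 : p.toList <+: t := List.isPrefixOf_iff_prefix.mp (Bool.and_elim_right hcond)
    apply h
    refine (hasEP_iff t _).mpr ⟨p.toList, h1, h2, ?_⟩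
    rw [ends_build]
    simp only [List.any_eq_true, Bool.and_eq_true]
    exact ⟨by simp [List.isEmpty_iff, h1], ⟨p, hp, by simp⟩⟩

theorem solveLoop_eq (root : Trie) : ∀ (t : List Char) (k : Int),
    solveLoop root k t =
      ((List.range t.length).filter
          (fun j => truthyOf (matchGo root (t.drop j) []))).map (fun (j : Nat) => k + (j : Int)) := by
  intro t
  induction t with
  | nil => intro k; simp [solveLoop]
  | cons c rest ih =>
    intro k
    have hstep :
        (((List.range rest.length).filter
            ((fun j => truthyOf (matchGo root ((c :: rest).drop j) [])) ∘ Nat.succ)).map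
          ((fun j : Nat => k + (j : Int)) ∘ Nat.succ))
        = solveLoop root (k + 1) rest := by
      rw [ih (k + 1)]
      have h1 : ((fun j => truthyOf (matchGo root ((c :: rest).drop j) [])) ∘ Nat.succ)
          = (fun j => truthyOf (matchGo root (rest.drop j) [])) := rfl
      rw [h1]
      apply List.map_congr_left
      intro a _
      simp [Function.comp]
      push_cast
      ring
    simp only [List.length_cons, List.range_succ_eq_map, List.filter_cons,
               List.filter_map, List.drop_zero]
    by_cases h : truthyOf (matchGo root (c :: rest) []) = true
    · simp only [h, if_true, List.map_cons, List.map_map]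
      rw [hstep]
      simp [solveLoop, h]
    · simp only [h, Bool.false_eq_true, if_false, List.map_map]
      rw [hstep]
      simp [solveLoop, h]

-- ===== VERDICT (by name: the statement is the Claim_ definition above) =====
theorem solve_spec : Claim_equal_solve := by
  intro text n patterns _
  unfold Spec_solve solve solve_alt
  rw [solveLoop_eq]
  have h1 : ((List.range text.toList.length).filter
        (fun j => truthyOf (matchGo (buildTrie patterns) (text.toList.drop j) []))) =
      ((List.range text.toList.length).filter
        (fun i => patterns.any
          (fun p => !p.toList.isEmpty && p.toList.isPrefixOf (text.toList.drop i)))) := by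
    apply List.filter_congr
    intro j _
    rw [cond_eq]
  rw [h1]
  apply List.map_congr_left
  intro a _
  simp
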